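-- pv_equiv track=rewrite | github.com/Seif-Elkerdany/Vital-Care-AI | backend_api/RAG/chunking.py | _overlap_tail
-- ===== SOURCE A (Python) =====
-- def _overlap_tail(units: list[str], chunk_overlap: int) -> list[str]:
--     if not units or chunk_overlap <= 0:
--         return []
--
--     tail: list[str] = []
--     total = 0
--     for unit in reversed(units):
--         tail.insert(0, unit)
--         total += len(unit) + 1
--         if total >= chunk_overlap:
--             break
--     return tail
-- ===== SOURCE B (Python) =====
-- def _overlap_tail(units: list[str], chunk_overlap: int) -> list[str]:
--     if not units or chunk_overlap <= 0:
--         return []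
--     remaining = chunk_overlap
--     keep = 0
--     for u in reversed(units):
--         keep += 1
--         remaining -= len(u) + 1
--         if remaining <= 0:
--             break
--     return units[len(units) - keep:]
-- ===== Notes on version B (the rewrite author's own statement) =====
-- stated objective: faster
-- what changed: Instead of building the tail with repeated list.insert(0, ...) (quadratic in the tail length), B only counts how many trailing units are needed while scanning reversed(units), then returns a single slice units[len(units)-keep:].
import Mathlib
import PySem

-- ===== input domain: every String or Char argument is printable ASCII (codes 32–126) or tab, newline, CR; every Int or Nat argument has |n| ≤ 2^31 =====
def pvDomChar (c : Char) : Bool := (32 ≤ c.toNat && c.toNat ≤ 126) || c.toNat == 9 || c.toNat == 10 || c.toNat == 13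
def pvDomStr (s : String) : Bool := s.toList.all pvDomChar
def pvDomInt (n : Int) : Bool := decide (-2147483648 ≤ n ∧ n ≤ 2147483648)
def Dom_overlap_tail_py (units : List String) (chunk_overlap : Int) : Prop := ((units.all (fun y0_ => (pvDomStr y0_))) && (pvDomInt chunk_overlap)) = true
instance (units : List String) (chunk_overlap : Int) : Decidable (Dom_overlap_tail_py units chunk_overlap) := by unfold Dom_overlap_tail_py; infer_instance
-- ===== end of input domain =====

-- B replaces A's repeated tail.insert(0, unit) (quadratic in the tail length) by counting how many
-- trailing units are needed and taking a single slice; objective: faster (asymptotic in tail length).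

-- ===== PORT A =====
-- the for-loop over reversed(units): state = (tail, total); tail.insert(0, unit) is cons; break = stop
def overlapLoopA : List String → List String → Int → Int → List String
  | [], tail, _, _ => tail
  | u :: rest, tail, total, co =>
    let tail' := u :: tail
    let total' := total + PySem.Str.len u + 1
    if co ≤ total' then tail' else overlapLoopA rest tail' total' co

def overlap_tail_py (units : List String) (chunk_overlap : Int) : List String :=
  if units = [] ∨ chunk_overlap ≤ 0 then []
  else overlapLoopA units.reverse [] 0 chunk_overlap

-- ===== PORT B =====
-- the for-loop over reversed(units) tracking (keep, remaining); returns keep at the break/end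
def countKeepB : List String → Int → Nat
  | [], _ => 0
  | u :: rest, remaining =>
    let remaining' := remaining - (PySem.Str.len u + 1)
    if remaining' ≤ 0 then 1 else countKeepB rest remaining' + 1

-- units[len(units) - keep:] — start index is ≥ 0 (keep ≤ len(units)), so the slice is exact here
def overlap_tail_py_alt (units : List String) (chunk_overlap : Int) : List String :=
  if units = [] ∨ chunk_overlap ≤ 0 then []
  else
    let keep := countKeepB units.reverse chunk_overlap
    PySem.List.slice units (some ((units.length : Int) - keep)) none

-- ===== PRECONDITION & SPEC =====
def Spec_overlap_tail_py (units : List String) (chunk_overlap : Int) (out : List String) : Prop := out = overlap_tail_py_alt units chunk_overlap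
instance (units : List String) (chunk_overlap : Int) (out : List String) : Decidable (Spec_overlap_tail_py units chunk_overlap out) := by unfold Spec_overlap_tail_py; infer_instance

-- ===== CLAIM (what is proved, stated in full; the proofs are below) =====
def Claim_equal_overlap_tail_py : Prop := ∀ (units : List String) (chunk_overlap : Int), Dom_overlap_tail_py units chunk_overlap → Spec_overlap_tail_py units chunk_overlap (overlap_tail_py units chunk_overlap)

-- ===== LEMMAS AND PROOFS =====

theorem countKeepB_le_length (r : List String) (c : Int) : countKeepB r c ≤ r.length := by
  induction r generalizing c with
  | nil => simp [countKeepB]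
  | cons u rest ih =>
    simp only [countKeepB, List.length_cons]
    split
    · omega
    · exact Nat.add_le_add_right (ih _) 1

-- A's loop returns the reversed taken-prefix of the (reversed) input, prefix length = B's count
theorem overlapLoopA_eq (r : List String) : ∀ (acc : List String) (total co : Int),
    overlapLoopA r acc total co = (r.take (countKeepB r (co - total))).reverse ++ acc := by
  induction r with
  | nil => intro acc total co; simp [overlapLoopA, countKeepB]
  | cons u rest ih =>
    intro acc total co
    simp only [overlapLoopA, countKeepB]
    split_ifs with h1 h2 <;> try (exfalso; omega)
    · simp
    · rw [ih]
      have harg : co - (total + PySem.Str.len u + 1) = co - total - (PySem.Str.len u + 1) := by ring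
      rw [harg]
      simp [List.take_succ_cons]

theorem overlap_tail_py_spec_core (units : List String) (co : Int) :
    overlap_tail_py units co = overlap_tail_py_alt units co := by
  unfold overlap_tail_py overlap_tail_py_alt
  split
  · rfl
  · set k := countKeepB units.reverse co with hk
    have hkle : k ≤ units.length := by
      simpa using countKeepB_le_length units.reverse co
    rw [overlapLoopA_eq]
    have h0 : co - 0 = co := by ring
    rw [h0, ← hk, List.append_nil]
    have hnn : (0 : Int) ≤ (units.length : Int) - k := by
      omega
    rw [PySem.List.slice_from _ hnn]
    have ht : ((units.length : Int) - k).toNat = units.length - k := by omega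
    rw [ht, List.take_reverse, List.reverse_reverse]

-- ===== VERDICT (by name: the statement is the Claim_ definition above) =====
theorem overlap_tail_py_spec : Claim_equal_overlap_tail_py := by
  intro units co _
  exact overlap_tail_py_spec_core units co
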